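-- pv_equiv track=rewrite | github.com/qml2code/dofimak | dofimak/dofimak.py | get_conda_package_installation
-- ===== SOURCE A (Python) =====
-- special_cond_separator = ";"
--
-- def divide_conda_dep_str(dep_str: str):
--     dep_spl = dep_str.split(special_cond_separator)
--     package_name = dep_spl[0]
--     if len(dep_spl) > 1:
--         channel_name = dep_spl[1]
--     else:
--         channel_name = None
--     if len(dep_spl) > 2:
--         solver_name = dep_spl[2]
--     else:
--         solver_name = None
--     return package_name, channel_name, solver_name
--
-- def get_conda_package_installation(dep_list, no_conda_tos=False):
--     installation_groups = {}
--     if not no_conda_tos: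
--         added_channels = []
--     for dep in dep_list:
--         package_name, channel_name, solver_name = divide_conda_dep_str(dep)
--         installation_group = (channel_name, solver_name)
--         if installation_group in installation_groups:
--             installation_groups[installation_group].append(package_name)
--         else:
--             installation_groups[installation_group] = [package_name]
--         if (
--             (not no_conda_tos)
--             and (channel_name is not None)
--             and (channel_name not in added_channels)
--         ):
--             added_channels.append(channel_name)
--     if no_conda_tos:
--         commands = []
--     else:
--         commands = [
--             "conda config --append channels " + " ".join(added_channels),
--             "conda tos accept",
--         ]
--     for (channel_name, solver_name), package_names in installation_groups.items():
--         command = "conda install"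
--         if channel_name is not None:
--             command += f" -c {channel_name}"
--         if solver_name is not None:
--             command += f" --solver={solver_name}"
--         commands.append(f"{command} " + " ".join(package_names))
--     return commands
-- ===== SOURCE B (Python) =====
-- special_cond_separator = ";"
--
--
-- def divide_conda_dep_str(dep_str: str):
--     dep_spl = dep_str.split(special_cond_separator)
--     package_name = dep_spl[0]
--     channel_name = dep_spl[1] if len(dep_spl) > 1 else None
--     solver_name = dep_spl[2] if len(dep_spl) > 2 else None
--     return package_name, channel_name, solver_name
--
--
-- def _install_command(group, parsed):
--     channel_name, solver_name = group
--     command = "conda install"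
--     if channel_name is not None:
--         command += f" -c {channel_name}"
--     if solver_name is not None:
--         command += f" --solver={solver_name}"
--     packages = [p for p, c, s in parsed if (c, s) == group]
--     return command + " " + " ".join(packages)
--
--
-- def get_conda_package_installation(dep_list, no_conda_tos=False):
--     parsed = [divide_conda_dep_str(dep) for dep in dep_list]
--     groups = list(dict.fromkeys((c, s) for _, c, s in parsed))
--     if no_conda_tos:
--         commands = []
--     else:
--         channels = list(dict.fromkeys(c for _, c, _ in parsed if c is not None))
--         commands = [
--             "conda config --append channels " + " ".join(channels),
--             "conda tos accept",
--         ]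
--     return commands + [_install_command(g, parsed) for g in groups]
-- ===== Notes on version B (the rewrite author's own statement) =====
-- stated objective: alternative
-- what changed: B replaces A's single stateful pass (a dict of grouped package lists plus an inline added_channels list threaded through one loop) by a parse-once/derive decomposition: parse all deps once, take the ordered-unique (channel, solver) keys with dict.fromkeys, derive the channel list by a separate dedup over the parsed deps, and build each install command by filtering the parsed list per group; it trades the dict accumulation for a per-group filter scan of similar total cost.
import Mathlib
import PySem

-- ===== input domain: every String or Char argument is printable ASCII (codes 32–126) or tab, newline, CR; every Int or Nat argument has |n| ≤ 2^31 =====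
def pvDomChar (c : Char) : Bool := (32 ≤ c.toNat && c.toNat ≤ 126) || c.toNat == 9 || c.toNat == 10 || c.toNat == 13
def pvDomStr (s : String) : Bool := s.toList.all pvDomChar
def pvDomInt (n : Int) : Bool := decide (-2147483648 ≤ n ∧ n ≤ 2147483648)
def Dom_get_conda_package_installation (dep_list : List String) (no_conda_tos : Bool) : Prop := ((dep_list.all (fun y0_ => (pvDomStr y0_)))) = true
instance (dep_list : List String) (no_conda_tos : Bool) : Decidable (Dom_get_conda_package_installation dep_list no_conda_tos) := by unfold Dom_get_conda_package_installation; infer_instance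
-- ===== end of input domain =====

-- B restructures A's single stateful grouping pass into parse-once / dedup-keys / derive-channels /
-- filter-per-group phases; same return value; an alternative decomposition of similar cost (no speed claim).

-- ===== PORT A =====
-- split? with the nonempty literal separator ";" always returns some, and Python's split
-- always yields a nonempty list, so the defaults below are unreachable (exact).
def divide_conda_dep_str (dep_str : String) : String × Option String × Option String :=
  let dep_spl := (PySem.Str.split? dep_str ";").getD []
  let package_name := dep_spl.getD 0 ""
  let channel_name := if dep_spl.length > 1 then some (dep_spl.getD 1 "") else none
  let solver_name := if dep_spl.length > 2 then some (dep_spl.getD 2 "") else none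
  (package_name, channel_name, solver_name)

def get_conda_package_installation (dep_list : List String) (no_conda_tos : Bool) : List String :=
  let st := dep_list.foldl
    (fun (st : PySem.Dict (Option String × Option String) (List String) × List String) dep =>
      let pcs := divide_conda_dep_str dep
      let package_name := pcs.1
      let channel_name := pcs.2.1
      let solver_name := pcs.2.2
      let installation_group := (channel_name, solver_name)
      (-- if installation_group in installation_groups: append, else: start a new group
       if st.1.contains installation_group then
         st.1.modify installation_group [] (fun l => l ++ [package_name])
       else
         st.1.insert installation_group [package_name],
       -- (not no_conda_tos) and (channel_name is not None) and (channel_name not in added_channels)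
       if !no_conda_tos then
         match channel_name with
         | some c => if st.2.contains c then st.2 else st.2 ++ [c]
         | none => st.2
       else st.2))
    (PySem.Dict.empty, [])
  let commands :=
    if no_conda_tos then []
    else ["conda config --append channels " ++ PySem.Str.join " " st.2, "conda tos accept"]
  st.1.items.foldl
    (fun commands kv =>
      let command := "conda install"
      let command := match kv.1.1 with | some c => command ++ " -c " ++ c | none => command
      let command := match kv.1.2 with | some s => command ++ " --solver=" ++ s | none => command
      commands ++ [command ++ " " ++ PySem.Str.join " " kv.2])
    commands

-- ===== PORT B =====
def pvInstallCommand (group : Option String × Option String)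
    (parsed : List (String × Option String × Option String)) : String :=
  let command := "conda install"
  let command := match group.1 with | some c => command ++ " -c " ++ c | none => command
  let command := match group.2 with | some s => command ++ " --solver=" ++ s | none => command
  let packages := (parsed.filter (fun pr => pr.2 == group)).map (·.1)
  command ++ " " ++ PySem.Str.join " " packages

def get_conda_package_installation_alt (dep_list : List String) (no_conda_tos : Bool) : List String :=
  let parsed := dep_list.map divide_conda_dep_str
  let groups := PySem.List.dedup (parsed.map (·.2))
  let commands :=
    if no_conda_tos then []
    else
      let channels := PySem.List.dedup (parsed.filterMap (·.2.1))
      ["conda config --append channels " ++ PySem.Str.join " " channels, "conda tos accept"]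
  commands ++ groups.map (fun g => pvInstallCommand g parsed)

-- ===== PRECONDITION & SPEC =====
def Spec_get_conda_package_installation (dep_list : List String) (no_conda_tos : Bool) (out : List String) : Prop := out = get_conda_package_installation_alt dep_list no_conda_tos
instance (dep_list : List String) (no_conda_tos : Bool) (out : List String) : Decidable (Spec_get_conda_package_installation dep_list no_conda_tos out) := by unfold Spec_get_conda_package_installation; infer_instance

-- ===== CLAIM (what is proved, stated in full; the proofs are below) =====
def Claim_equal_get_conda_package_installation : Prop := ∀ (dep_list : List String) (no_conda_tos : Bool), Dom_get_conda_package_installation dep_list no_conda_tos → Spec_get_conda_package_installation dep_list no_conda_tos (get_conda_package_installation dep_list no_conda_tos)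

-- ===== LEMMAS AND PROOFS =====

-- the (channel, solver) key and the package name of a dependency string
def pvKey (dep : String) : Option String × Option String := (divide_conda_dep_str dep).2
def pvPkg (dep : String) : String := (divide_conda_dep_str dep).1

-- a fold whose two state components are updated independently splits into two folds
theorem pv_foldl_prod {α β γ : Type} (f : α → γ → α) (g : β → γ → β) (l : List γ) (a : α) (b : β) :
    l.foldl (fun s x => (f s.1 x, g s.2 x)) (a, b) = (l.foldl f a, l.foldl g b) := by
  induction l generalizing a b with
  | nil => rfl
  | cons x xs ih => simpa using ih (f a x) (g b x)

-- A's contains/modify/insert branch is exactly Dict.modify with default []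
theorem pv_branch_eq_modify (d : PySem.Dict (Option String × Option String) (List String))
    (k : Option String × Option String) (p : String) :
    (if d.contains k then d.modify k [] (fun l => l ++ [p]) else d.insert k [p])
      = d.modify k [] (fun l => l ++ [p]) := by
  by_cases h : d.contains k = true
  · simp [h]
  · simp only [Bool.not_eq_true] at h
    simp [h, PySem.Dict.modify, PySem.Dict.getD_of_not_contains d [] h]

theorem pv_items_eq_keys_map {κ : Type} [BEq κ] [LawfulBEq κ] (d : PySem.Dict κ (List String))
    (h : d.keys.Nodup) : d.items = d.keys.map (fun k => (k, d.getD k [])) := by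
  simp only [PySem.Dict.keys, List.map_map]
  have : ∀ p ∈ d.items, ((fun k => (k, d.getD k [])) ∘ (fun p => p.1)) p = id p := by
    intro p hp
    have hv : d.getD p.1 [] = p.2 :=
      PySem.Dict.getD_of_mem_items d (by exact hp) h []
    simp [hv]
  rw [List.map_congr_left this, List.map_id]

-- A's added_channels fold is Set.update with the non-None channels
theorem pv_chan_fold (l : List String) (acc : List String) :
    l.foldl (fun (acc : List String) dep =>
        match (divide_conda_dep_str dep).2.1 with
        | some c => if acc.contains c then acc else acc ++ [c]
        | none => acc) acc
      = PySem.Set.update acc (l.filterMap (fun dep => (divide_conda_dep_str dep).2.1)) := by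
  induction l generalizing acc with
  | nil => rfl
  | cons dep rest ih =>
    cases hc : (divide_conda_dep_str dep).2.1 with
    | none => simpa [hc, List.filterMap_cons] using ih acc
    | some c =>
      simp only [List.foldl_cons, hc, List.filterMap_cons]
      rw [ih]
      rfl

theorem pv_foldl_append {α β : Type} (f : α → β) (l : List α) (init : List β) :
    l.foldl (fun acc x => acc ++ [f x]) init = init ++ l.map f := by
  induction l generalizing init with
  | nil => simp
  | cons x xs ih => simp [ih]

theorem get_conda_package_installation_spec_aux (dep_list : List String) (no_conda_tos : Bool) :
    get_conda_package_installation dep_list no_conda_tos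
      = get_conda_package_installation_alt dep_list no_conda_tos := by
  unfold get_conda_package_installation get_conda_package_installation_alt
  -- split the pair-state fold
  have hsplit :
      dep_list.foldl
        (fun (st : PySem.Dict (Option String × Option String) (List String) × List String) dep =>
          (if st.1.contains (pvKey dep) then
             st.1.modify (pvKey dep) [] (fun l => l ++ [pvPkg dep])
           else st.1.insert (pvKey dep) [pvPkg dep],
           if !no_conda_tos then
             match (divide_conda_dep_str dep).2.1 with
             | some c => if st.2.contains c then st.2 else st.2 ++ [c]
             | none => st.2
           else st.2))
        (PySem.Dict.empty, []) =
      (dep_list.foldl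
        (fun d dep => if d.contains (pvKey dep) then
             d.modify (pvKey dep) [] (fun l => l ++ [pvPkg dep])
           else d.insert (pvKey dep) [pvPkg dep]) PySem.Dict.empty,
       dep_list.foldl
        (fun (acc : List String) dep =>
          if !no_conda_tos then
            match (divide_conda_dep_str dep).2.1 with
            | some c => if acc.contains c then acc else acc ++ [c]
            | none => acc
          else acc) []) :=
    pv_foldl_prod
      (fun (d : PySem.Dict (Option String × Option String) (List String)) dep =>
        if d.contains (pvKey dep) then
          d.modify (pvKey dep) [] (fun l => l ++ [pvPkg dep])
        else d.insert (pvKey dep) [pvPkg dep])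
      (fun (acc : List String) dep =>
        if !no_conda_tos then
          match (divide_conda_dep_str dep).2.1 with
          | some c => if acc.contains c then acc else acc ++ [c]
          | none => acc
        else acc)
      dep_list PySem.Dict.empty []
  simp only [pvKey, pvPkg] at hsplit
  rw [hsplit]
  -- normalise the dict fold to a pure modify fold over (key, pkg) pairs
  have hstep : (fun (d : PySem.Dict (Option String × Option String) (List String)) dep =>
      if d.contains (divide_conda_dep_str dep).2 then
        d.modify (divide_conda_dep_str dep).2 [] (fun l => l ++ [(divide_conda_dep_str dep).1])
      else d.insert (divide_conda_dep_str dep).2 [(divide_conda_dep_str dep).1]) =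
      (fun d dep => d.modify (divide_conda_dep_str dep).2 [] (fun l => l ++ [(divide_conda_dep_str dep).1])) := by
    funext d dep; exact pv_branch_eq_modify d _ _
  rw [hstep]
  set D := dep_list.foldl
      (fun d dep => d.modify (divide_conda_dep_str dep).2 [] (fun l => l ++ [(divide_conda_dep_str dep).1]))
      PySem.Dict.empty with hD
  have hnodup : D.keys.Nodup := by
    rw [hD]
    exact PySem.Dict.nodup_keys_foldl_modify_key dep_list (fun dep => (divide_conda_dep_str dep).2)
      [] (fun _ dep => fun l => l ++ [(divide_conda_dep_str dep).1]) PySem.Dict.empty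
      PySem.Dict.nodup_keys_empty
  have hkeys : D.keys = PySem.List.dedup ((dep_list.map divide_conda_dep_str).map (·.2)) := by
    rw [hD, PySem.Dict.keys_foldl_modify_key dep_list (fun dep => (divide_conda_dep_str dep).2)
      [] (fun _ dep => fun l => l ++ [(divide_conda_dep_str dep).1]) PySem.Dict.empty]
    simp [PySem.List.dedup, PySem.Set.ofList, PySem.Set.update, List.map_map, PySem.Dict.empty,
      PySem.Dict.keys, PySem.Set.empty]
    rfl
  have hgetD : ∀ g, D.getD g [] =
      ((dep_list.map divide_conda_dep_str).filter (fun pr => pr.2 == g)).map (·.1) := by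
    intro g
    have := PySem.Dict.getD_foldl_modify_append
      (dep_list.map (fun dep => ((divide_conda_dep_str dep).2, (divide_conda_dep_str dep).1)))
      PySem.Dict.empty g
    rw [List.foldl_map] at this
    simp only [hD]
    rw [this]
    simp only [PySem.Dict.getD_empty, List.filter_map, List.map_map, List.nil_append]
    rfl
  -- channels
  have hchan : dep_list.foldl
      (fun (acc : List String) dep =>
        if !no_conda_tos then
          match (divide_conda_dep_str dep).2.1 with
          | some c => if acc.contains c then acc else acc ++ [c]
          | none => acc
        else acc) [] =
      (if no_conda_tos then [] else
        PySem.List.dedup ((dep_list.map divide_conda_dep_str).filterMap (·.2.1))) := by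
    cases no_conda_tos with
    | true => simp
    | false =>
      simp only [Bool.not_false, if_true, Bool.false_eq_true, if_false]
      rw [pv_chan_fold dep_list []]
      simp [PySem.List.dedup, PySem.Set.ofList, PySem.Set.update, PySem.Set.empty,
        List.filterMap_map]
  rw [hchan]
  -- items fold becomes a map over keys
  rw [pv_foldl_append, pv_items_eq_keys_map D hnodup, hkeys, List.map_map]
  cases no_conda_tos with
  | true =>
    simp only [if_true]
    congr 1
    apply List.map_congr_left
    intro g hg
    simp [Function.comp, pvInstallCommand, hgetD g]
  | false =>
    simp only [Bool.false_eq_true, if_false]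
    congr 1
    apply List.map_congr_left
    intro g hg
    simp [Function.comp, pvInstallCommand, hgetD g]

-- ===== VERDICT (by name: the statement is the Claim_ definition above) =====
theorem get_conda_package_installation_spec : Claim_equal_get_conda_package_installation := by
  intro dep_list no_conda_tos _
  exact get_conda_package_installation_spec_aux dep_list no_conda_tos
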